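-- pv_equiv track=rewrite | github.com/remster85/interview-prep | algos/interview/buildPhoneNumberWithChessPieces.py | buildNumber
-- ===== SOURCE A (Python) =====
-- def buildNumber(startingDigits, keyboardDigits, transitionRules, length):
--     """
--     Build numbers starting with digits from `startingDigits`, using only digits in `keyboardDigits`,
--     and respecting the `transitionRules`.
--
--     :param startingDigits: List of allowed starting digits.
--     :param keyboardDigits: List of allowed digits on the keyboard.
--     :param transitionRules: Dictionary defining valid transitions (e.g., {1: [2, 3], 2: [4]})
--     :param length: Desired length of the number.
--     :return: List of valid numbers as strings.
--     """
--     def isValidTransition(prev_digit, next_digit):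
--         """ Check if the transition from prev_digit to next_digit is valid. """
--         return next_digit in transitionRules.get(prev_digit, [])
--
--     def backtrack(current, remaining_length):
--         """ Use backtracking to build valid numbers. """
--         if remaining_length == 0:
--             result.append("".join(current))
--             return
--
--         last_digit = int(current[-1]) if current else None
--
--         for digit in keyboardDigits:
--             if last_digit is None or isValidTransition(last_digit, digit):
--                 backtrack(current + [str(digit)], remaining_length - 1)
--
--     result = []
--
--     for start_digit in startingDigits:
--         if start_digit in keyboardDigits:
--             backtrack([str(start_digit)], length - 1)
--
--     return result
-- ===== SOURCE B (Python) =====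
-- def buildNumber(startingDigits, keyboardDigits, transitionRules, length):
--     frontier = [(str(s), str(s)) for s in startingDigits if s in keyboardDigits]
--     for _ in range(length - 1):
--         if not frontier:
--             break
--         frontier = [
--             (prefix + str(d), str(d))
--             for (prefix, last) in frontier
--             for d in keyboardDigits
--             if d in transitionRules.get(int(last), [])
--         ]
--     return [prefix for (prefix, _) in frontier]
-- ===== Notes on version B (the rewrite author's own statement) =====
-- stated objective: simpler
-- what changed: Replaced the recursive backtracking (inner helper mutating a shared result list) by a short iterative level-by-level frontier build: start with the admissible one-digit strings and, length-1 times, extend every partial number with every keyboard digit the transition rules allow, which yields the same strings in the same order.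
-- outside the precondition, e.g. on buildNumber([1], [1], {}, 0): A returns [], B returns ['1']
import Mathlib
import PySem

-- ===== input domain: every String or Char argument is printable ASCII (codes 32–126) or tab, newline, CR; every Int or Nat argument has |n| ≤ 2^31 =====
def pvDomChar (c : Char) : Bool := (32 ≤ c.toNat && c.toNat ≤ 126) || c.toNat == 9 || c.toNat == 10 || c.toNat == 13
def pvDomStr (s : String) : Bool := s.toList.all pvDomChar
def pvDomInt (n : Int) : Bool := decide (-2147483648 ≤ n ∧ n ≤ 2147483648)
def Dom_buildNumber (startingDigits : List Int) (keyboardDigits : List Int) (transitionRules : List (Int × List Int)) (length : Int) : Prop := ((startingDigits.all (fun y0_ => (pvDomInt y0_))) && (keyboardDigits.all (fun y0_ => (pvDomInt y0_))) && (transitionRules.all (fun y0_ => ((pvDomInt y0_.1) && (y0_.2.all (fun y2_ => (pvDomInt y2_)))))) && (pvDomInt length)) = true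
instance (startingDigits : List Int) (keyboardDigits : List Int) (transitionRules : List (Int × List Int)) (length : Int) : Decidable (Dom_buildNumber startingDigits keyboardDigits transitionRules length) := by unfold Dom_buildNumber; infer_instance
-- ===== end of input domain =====

-- B replaces A's recursive backtracking by an iterative level-by-level frontier build (simpler; same output order).


-- ===== PORT A =====
-- isValidTransition(prev_digit, next_digit): next_digit in transitionRules.get(prev_digit, [])
def pyIsValidTransition (transitionRules : List (Int × List Int)) (prev_digit next_digit : Int) : Bool :=
  ((PySem.Dict.ofList transitionRules).getD prev_digit []).contains next_digit

-- backtrack(current, remaining_length).  `remaining < 0` (reached only when length ≤ 0, outside Pre_)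
-- is where Python's recursion can never hit its base case: it either recurses forever (RecursionError)
-- or falls through appending nothing; the port returns [] there.
-- int(current[-1]) is ported as (ofStr? s).getD 0: the elements of current are always str(int), so ofStr? always parses.
def pyBacktrackA (keyboardDigits : List Int) (transitionRules : List (Int × List Int))
    (current : List String) (remaining : Int) : List String :=
  if remaining = 0 then [PySem.Str.join "" current]
  else if remaining < 0 then []
  else
    match current.getLast? with
    | none =>
        keyboardDigits.foldl (fun acc digit =>
          acc ++ pyBacktrackA keyboardDigits transitionRules (current ++ [PySem.Int.toStr digit]) (remaining - 1)) []
    | some s =>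
        let last_digit := (PySem.Int.ofStr? s).getD 0
        keyboardDigits.foldl (fun acc digit =>
          if pyIsValidTransition transitionRules last_digit digit then
            acc ++ pyBacktrackA keyboardDigits transitionRules (current ++ [PySem.Int.toStr digit]) (remaining - 1)
          else acc) []
termination_by remaining.toNat
decreasing_by all_goals omega

def buildNumber (startingDigits : List Int) (keyboardDigits : List Int) (transitionRules : List (Int × List Int)) (length : Int) : List String :=
  startingDigits.foldl (fun result start_digit =>
    if keyboardDigits.contains start_digit then
      result ++ pyBacktrackA keyboardDigits transitionRules [PySem.Int.toStr start_digit] (length - 1)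
    else result) []

-- ===== PORT B =====
-- the `for _ in range(length-1): if not frontier: break; frontier = [...]` loop of Source B
def pyLoopB (keyboardDigits : List Int) (transitionRules : List (Int × List Int)) :
    List Int → List (String × String) → List (String × String)
  | [], frontier => frontier
  | _ :: rest, frontier =>
    if frontier.isEmpty then frontier
    else pyLoopB keyboardDigits transitionRules rest
      (frontier.flatMap (fun pl =>
        (keyboardDigits.filter (fun d =>
            ((PySem.Dict.ofList transitionRules).getD ((PySem.Int.ofStr? pl.2).getD 0) []).contains d)).map
          (fun d => (pl.1 ++ PySem.Int.toStr d, PySem.Int.toStr d))))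

def buildNumber_alt (startingDigits : List Int) (keyboardDigits : List Int) (transitionRules : List (Int × List Int)) (length : Int) : List String :=
  let init := (startingDigits.filter (fun s => keyboardDigits.contains s)).map
      (fun s => (PySem.Int.toStr s, PySem.Int.toStr s))
  let final := pyLoopB keyboardDigits transitionRules (PySem.List.pyRange 0 (length - 1) 1) init
  final.map (fun pl => pl.1)

-- ===== PRECONDITION & SPEC =====
-- Pre_ excludes length ≤ 0: there Python A's negative remaining count never reaches its base case, so A
-- either recurses forever (RecursionError, when a transition cycle is reachable) or falls through and
-- returns [] as an accident of the failed recursion; B naturally returns the one-digit frontier there.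
def Pre_buildNumber (startingDigits : List Int) (keyboardDigits : List Int) (transitionRules : List (Int × List Int)) (length : Int) : Prop := 1 ≤ length
instance (startingDigits : List Int) (keyboardDigits : List Int) (transitionRules : List (Int × List Int)) (length : Int) : Decidable (Pre_buildNumber startingDigits keyboardDigits transitionRules length) := by unfold Pre_buildNumber; infer_instance
def pvWitness_buildNumber : List Int × List Int × (List (Int × List Int)) × Int := ([1], [1, 2], [(1, [2])], 2)

def Spec_buildNumber (startingDigits : List Int) (keyboardDigits : List Int) (transitionRules : List (Int × List Int)) (length : Int) (out : List String) : Prop := out = buildNumber_alt startingDigits keyboardDigits transitionRules length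
instance (startingDigits : List Int) (keyboardDigits : List Int) (transitionRules : List (Int × List Int)) (length : Int) (out : List String) : Decidable (Spec_buildNumber startingDigits keyboardDigits transitionRules length out) := by unfold Spec_buildNumber; infer_instance

-- ===== CLAIM (what is proved, stated in full; the proofs are below) =====
def Claim_equal_buildNumber : Prop := ∀ (startingDigits : List Int) (keyboardDigits : List Int) (transitionRules : List (Int × List Int)) (length : Int), Dom_buildNumber startingDigits keyboardDigits transitionRules length → Pre_buildNumber startingDigits keyboardDigits transitionRules length → Spec_buildNumber startingDigits keyboardDigits transitionRules length (buildNumber startingDigits keyboardDigits transitionRules length)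

-- ===== LEMMAS AND PROOFS =====

-- one expansion step of B's frontier (the body of B's comprehension)
def pvExt (keyboardDigits : List Int) (transitionRules : List (Int × List Int))
    (pl : String × String) : List (String × String) :=
  (keyboardDigits.filter (fun d =>
      ((PySem.Dict.ofList transitionRules).getD ((PySem.Int.ofStr? pl.2).getD 0) []).contains d)).map
    (fun d => (pl.1 ++ PySem.Int.toStr d, PySem.Int.toStr d))

def pvStep (keyboardDigits : List Int) (transitionRules : List (Int × List Int))
    (fr : List (String × String)) : List (String × String) :=
  fr.flatMap (pvExt keyboardDigits transitionRules)

-- n-fold expansion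
def pvIter (keyboardDigits : List Int) (transitionRules : List (Int × List Int))
    (n : Nat) (fr : List (String × String)) : List (String × String) :=
  (pvStep keyboardDigits transitionRules)^[n] fr

theorem pvFoldlIf {α β : Type} (p : α → Bool) (g : α → List β) (l : List α) (acc : List β) :
    l.foldl (fun acc x => if p x then acc ++ g x else acc) acc
      = acc ++ (l.filter p).flatMap g := by
  induction l generalizing acc with
  | nil => simp
  | cons x l ih =>
    by_cases h : p x <;> simp [h, ih]

theorem pvJoinNilAppend (l : List (List Char)) (c : List Char) :
    PySem.Chars.join [] (l ++ [c]) = PySem.Chars.join [] l ++ c := by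
  induction l with
  | nil => simp [PySem.Chars.join_nil, PySem.Chars.join_singleton]
  | cons x l ih =>
    cases l with
    | nil => simp [PySem.Chars.join_singleton, PySem.Chars.join_cons_cons]
    | cons y l => simp [PySem.Chars.join_cons_cons] at ih ⊢; simp [ih]

theorem pvJoinStrAppend (l : List String) (c : String) :
    PySem.Str.join "" (l ++ [c]) = PySem.Str.join "" l ++ c := by
  apply String.toList_inj.mp
  simp [PySem.Str.toList_join, String.toList_append, pvJoinNilAppend]

theorem pvJoinStrSingleton (c : String) : PySem.Str.join "" [c] = c := by
  apply String.toList_inj.mp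
  simp [PySem.Str.toList_join, PySem.Chars.join_singleton]

theorem pvIter_flatMap (keyboardDigits : List Int) (transitionRules : List (Int × List Int))
    (n : Nat) (xs : List (String × String)) :
    pvIter keyboardDigits transitionRules n xs
      = xs.flatMap (fun x => pvIter keyboardDigits transitionRules n [x]) := by
  induction n generalizing xs with
  | zero => simp [pvIter]
  | succ n ih =>
    have hstep : ∀ ys, pvIter keyboardDigits transitionRules (n + 1) ys
        = pvIter keyboardDigits transitionRules n (pvStep keyboardDigits transitionRules ys) := by
      intro ys; simp [pvIter, Function.iterate_succ_apply]
    have hpt : ∀ x, (pvExt keyboardDigits transitionRules x).flatMap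
        (fun y => pvIter keyboardDigits transitionRules n [y])
        = pvIter keyboardDigits transitionRules n (pvExt keyboardDigits transitionRules x) :=
      fun x => (ih _).symm
    calc pvIter keyboardDigits transitionRules (n + 1) xs
        = pvIter keyboardDigits transitionRules n (pvStep keyboardDigits transitionRules xs) := hstep xs
      _ = (pvStep keyboardDigits transitionRules xs).flatMap
            (fun y => pvIter keyboardDigits transitionRules n [y]) := ih _
      _ = xs.flatMap (fun x => (pvExt keyboardDigits transitionRules x).flatMap
            (fun y => pvIter keyboardDigits transitionRules n [y])) := by
            simp [pvStep, List.flatMap_assoc]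
      _ = xs.flatMap (fun x => pvIter keyboardDigits transitionRules n
            (pvStep keyboardDigits transitionRules [x])) := by
            simp only [hpt]; simp [pvStep]
      _ = xs.flatMap (fun x => pvIter keyboardDigits transitionRules (n + 1) [x]) := by
            simp only [hstep]

theorem pvIter_nil (keyboardDigits : List Int) (transitionRules : List (Int × List Int)) (n : Nat) :
    pvIter keyboardDigits transitionRules n [] = [] := by
  induction n with
  | zero => rfl
  | succ n ih => simpa [pvIter, Function.iterate_succ_apply, pvStep] using ih

theorem pyLoopB_eq (keyboardDigits : List Int) (transitionRules : List (Int × List Int)) :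
    ∀ (l : List Int) (fr : List (String × String)),
      pyLoopB keyboardDigits transitionRules l fr = pvIter keyboardDigits transitionRules l.length fr := by
  intro l
  induction l with
  | nil => intro fr; rfl
  | cons x rest ih =>
    intro fr
    rw [pyLoopB]
    by_cases h : fr.isEmpty
    · rw [if_pos h]
      rw [List.isEmpty_iff.mp h, pvIter_nil]
    · rw [if_neg h, ih]
      show pvIter keyboardDigits transitionRules rest.length (pvStep keyboardDigits transitionRules fr) = _
      simp [pvIter, pvStep, Function.iterate_succ_apply, List.length_cons]

-- main invariant: backtracking from a nonempty `current` = n-fold frontier expansion of the single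
-- state (join(current), last element of current)
theorem pvMain (keyboardDigits : List Int) (transitionRules : List (Int × List Int))
    (n : Nat) (current : List String) (s p : String)
    (hlast : current.getLast? = some s) (hjoin : PySem.Str.join "" current = p) :
    pyBacktrackA keyboardDigits transitionRules current (n : Int)
      = (pvIter keyboardDigits transitionRules n [(p, s)]).map (fun pl => pl.1) := by
  induction n generalizing current s p with
  | zero => simp [pyBacktrackA, pvIter, hjoin]
  | succ n ih =>
    rw [pyBacktrackA.eq_def]
    have h0 : ¬ ((n + 1 : Nat) : Int) = 0 := by omega
    have h1 : ¬ ((n + 1 : Nat) : Int) < 0 := by omega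
    simp only [h0, h1, if_false, hlast]
    have hsub : ((n + 1 : Nat) : Int) - 1 = (n : Int) := by omega
    rw [hsub]
    rw [pvFoldlIf (fun digit => pyIsValidTransition transitionRules ((PySem.Int.ofStr? s).getD 0) digit)
        (fun digit => pyBacktrackA keyboardDigits transitionRules (current ++ [PySem.Int.toStr digit]) (n : Int))]
    -- rewrite each recursive call with the induction hypothesis
    have hrec : ∀ digit,
        pyBacktrackA keyboardDigits transitionRules (current ++ [PySem.Int.toStr digit]) (n : Int)
          = (pvIter keyboardDigits transitionRules n [(p ++ PySem.Int.toStr digit, PySem.Int.toStr digit)]).map (fun pl => pl.1) := by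
      intro digit
      exact ih (current ++ [PySem.Int.toStr digit]) (PySem.Int.toStr digit) (p ++ PySem.Int.toStr digit)
        (by simp) (by rw [pvJoinStrAppend, hjoin])
    -- unfold one step of pvIter on the right
    have hstep : pvIter keyboardDigits transitionRules (n + 1) [(p, s)]
        = pvIter keyboardDigits transitionRules n (pvExt keyboardDigits transitionRules (p, s)) := by
      simp [pvIter, Function.iterate_succ_apply, pvStep]
    rw [hstep, pvIter_flatMap keyboardDigits transitionRules n (pvExt keyboardDigits transitionRules (p, s))]
    simp only [pvExt, pyIsValidTransition, List.flatMap_map, List.map_flatMap]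
    simp only [List.nil_append, hrec]

-- ===== VERDICT (by name: the statement is the Claim_ definition above) =====
theorem buildNumber_spec : Claim_equal_buildNumber := by
  intro startingDigits keyboardDigits transitionRules length _hdom hpre
  unfold Spec_buildNumber
  have hn : length - 1 = ((length - 1).toNat : Int) := by
    have : (1 : Int) ≤ length := hpre
    omega
  -- A's side
  rw [buildNumber]
  rw [pvFoldlIf (fun start_digit => keyboardDigits.contains start_digit)
      (fun start_digit => pyBacktrackA keyboardDigits transitionRules [PySem.Int.toStr start_digit] (length - 1))]
  rw [List.nil_append]
  have hA : ∀ start_digit,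
      pyBacktrackA keyboardDigits transitionRules [PySem.Int.toStr start_digit] (length - 1)
        = (pvIter keyboardDigits transitionRules (length - 1).toNat
            [(PySem.Int.toStr start_digit, PySem.Int.toStr start_digit)]).map (fun pl => pl.1) := by
    intro start_digit
    rw [hn]
    exact pvMain keyboardDigits transitionRules (length - 1).toNat [PySem.Int.toStr start_digit]
      (PySem.Int.toStr start_digit) (PySem.Int.toStr start_digit) (by simp) (pvJoinStrSingleton _)
  -- B's side
  rw [buildNumber_alt]
  rw [pyLoopB_eq]
  have hlen : (PySem.List.pyRange 0 (length - 1) 1).length = (length - 1).toNat := by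
    rw [PySem.List.pyRange_one]
    simp
  rw [hlen]
  rw [pvIter_flatMap]
  simp only [List.flatMap_map, List.map_flatMap, hA]
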